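/- GENERATED by farm/mkstatement.py from design/units.tsv (unit `start_decoder.C11g`) and the assertions of Vorbis/Spec/StartDecoderC11.lean — do not edit.
   THE STATEMENT of the proof unit `start_decoder.C11g`: segment C11g of `start_decoder` (24 instructions; entries 0x114cd0;
   exits 0x113b22,0x114ca3; ranges 0x114cd0-0x114cf9 + 0x114d86-0x114db4)
   takes each of its entry assertions to one of its exit assertions (`Vorbis.Spec.StartDecoder.SegC11g`), given the contracts of its callees.
   What the names mean: Vorbis/Spec/Basic.lean (the shared hypotheses), Vorbis/Spec/StartDecoderC11.lean (the assertions). The theorem to prove: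
   `theorem start_decoder_C11g_ok : Vorbis.Spec.start_decoder_C11g.Statement`. -/
import Vorbis.Spec.Alloc
import Vorbis.Spec.Leaves
import Vorbis.Spec.StartDecoderC11
namespace Vorbis.Spec.start_decoder_C11g
open X86 X86.User Asan

/-- The statement of unit `start_decoder.C11g`. -/
def Statement : Prop :=
  ∀ (Lay : Layout) (_hLay : Lay.hi = 0x1000000) (μ : Microarch) (_hμ : UserX.MicroOK μ) (u₀ : State)
    (_hcode : HasCodeNat Lay u₀ Vorbis.L.start_decoder.entry Vorbis.Code.code_start_decoder.nat Vorbis.L.start_decoder.size)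
    (_h_asan_load4_noabort : Asan.SmallCheck Lay μ Vorbis.WayInv (Vorbis.CodeOK u₀) [.rax, .rcx, .rdx] 4 Vorbis.L.__asan_load4_noabort.entry)
    (_h_asan_store2_noabort : Asan.SmallCheck Lay μ Vorbis.WayInv (Vorbis.CodeOK u₀) [.rax, .rcx, .rdx] 2 Vorbis.L.__asan_store2_noabort.entry)
    (_h_error : ∀ (others : List Obj) (frames : List (Nat × FrameLayout)), Calls Lay μ Vorbis.WayInv (Vorbis.conv u₀) Vorbis.L.error.entry (Vorbis.Spec.error.spec others frames))
    (_h_setup_temp_free : ∀ (others : List Obj) (frames : List (Nat × FrameLayout)) (A : Arena) (m : Nat) (rest : List (Nat × Nat)), Calls Lay μ Vorbis.WayInv (Vorbis.conv u₀) Vorbis.L.setup_temp_free.entry (Vorbis.Spec.setup_temp_free.spec others frames A m rest)),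
    Vorbis.Spec.StartDecoder.SegC11g Lay μ u₀

end Vorbis.Spec.start_decoder_C11g
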